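-- pv_equiv track=rewrite | github.com/benz3927/job-hunting-agent | app.py | trim_history
-- ===== SOURCE A (Python) =====
-- MEMORY_WINDOW = 10
--
-- def trim_history(history):
--     if len(history) > MEMORY_WINDOW:
--         history = history[-MEMORY_WINDOW:]
--         while history and not (
--             isinstance(history[0].get("content"), str) and
--             history[0].get("role") == "user"
--         ):
--             history = history[1:]
--     return history
-- ===== SOURCE B (Python) =====
-- MEMORY_WINDOW = 10
--
-- def trim_history(history):
--     if len(history) <= MEMORY_WINDOW:
--         return history
--     window = history[-MEMORY_WINDOW:]
--     i = next((j for j, m in enumerate(window)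
--               if isinstance(m.get("content"), str) and m.get("role") == "user"),
--              len(window))
--     return window[i:]
-- ===== Notes on version B (the rewrite author's own statement) =====
-- stated objective: simpler
-- what changed: Replaces the while-pop loop (repeated list re-slicing) with a single scan for the first valid index followed by one slice window[i:], with an early return when no trimming is needed.
import Mathlib
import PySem

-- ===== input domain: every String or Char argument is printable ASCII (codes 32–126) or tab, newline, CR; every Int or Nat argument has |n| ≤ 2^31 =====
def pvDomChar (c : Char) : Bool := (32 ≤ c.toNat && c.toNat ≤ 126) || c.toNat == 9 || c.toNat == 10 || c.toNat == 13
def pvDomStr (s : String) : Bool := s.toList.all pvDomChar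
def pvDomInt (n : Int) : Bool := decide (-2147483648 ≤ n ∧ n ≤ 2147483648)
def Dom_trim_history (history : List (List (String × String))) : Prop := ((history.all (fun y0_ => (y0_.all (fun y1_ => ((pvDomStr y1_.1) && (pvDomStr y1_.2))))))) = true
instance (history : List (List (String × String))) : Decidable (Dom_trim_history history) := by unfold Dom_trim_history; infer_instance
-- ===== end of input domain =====

-- B replaces A's while-pop loop with one scan for the first valid index plus a single slice (objective: simpler).
-- ===== PORT A =====
-- the loop predicate: isinstance(m.get("content"), str) and m.get("role") == "user"
-- (values are str by the dict[str,str] type, so the isinstance test is presence of "content")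
def pvValidMsg (m : List (String × String)) : Bool :=
  (m.lookup "content").isSome && (m.lookup "role" == some "user")

-- the while loop: pop the head (history = history[1:]) until empty or head valid
def pvTrimLoopA : List (List (String × String)) → List (List (String × String))
  | [] => []
  | m :: rest => if pvValidMsg m then m :: rest else pvTrimLoopA rest

def trim_history (history : List (List (String × String))) : List (List (String × String)) :=
  if history.length > 10 then
    pvTrimLoopA (PySem.List.slice history (some (-10)) none)
  else history

-- ===== PORT B =====
def trim_history_alt (history : List (List (String × String))) : List (List (String × String)) :=
  if history.length ≤ 10 then history
  else
    let window := PySem.List.slice history (some (-10)) none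
    let i := window.findIdx pvValidMsg   -- next(…, default=len(window)) = findIdx (length if none)
    window.drop i                         -- window[i:]

-- ===== PRECONDITION & SPEC =====
def Spec_trim_history (history : List (List (String × String))) (out : List (List (String × String))) : Prop := out = trim_history_alt history
instance (history : List (List (String × String))) (out : List (List (String × String))) : Decidable (Spec_trim_history history out) := by unfold Spec_trim_history; infer_instance

-- ===== CLAIM (what is proved, stated in full; the proofs are below) =====
def Claim_equal_trim_history : Prop := ∀ (history : List (List (String × String))), Dom_trim_history history → Spec_trim_history history (trim_history history)

-- ===== LEMMAS AND PROOFS =====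

-- A's while-pop loop computes drop-to-first-valid-index
theorem pvTrimLoopA_eq_drop_findIdx (w : List (List (String × String))) :
    pvTrimLoopA w = w.drop (w.findIdx pvValidMsg) := by
  induction w with
  | nil => rfl
  | cons m rest ih =>
    simp only [pvTrimLoopA, List.findIdx_cons]
    by_cases hm : pvValidMsg m <;> simp [hm, ih]

-- ===== VERDICT (by name: the statement is the Claim_ definition above) =====
theorem trim_history_spec : Claim_equal_trim_history := by
  intro history _
  unfold Spec_trim_history trim_history trim_history_alt
  split_ifs with h1 h2
  · omega
  · exact pvTrimLoopA_eq_drop_findIdx _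
  · rfl
  · omega
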